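-- pv_equiv track=rewrite | github.com/quadrismegistus/prosodic | prosodic/langs.py | fix_recasing
-- ===== SOURCE A (Python) =====
-- def fix_recasing(l, token):
--     # return lowercases
--     tokenl=token.lower()
--     if tokenl!=token:
--         o=[]
--         i=0
--         for x in l:
--             xlen=len(x)
--             o+=[token[i:i+xlen]]
--             i+=xlen
--         l=o
--     return l
-- ===== SOURCE B (Python) =====
-- def fix_recasing(l, token):
--     if token.lower() == token:
--         return l
--     it = iter(token)
--     out = []
--     for x in l:
--         buf = []
--         for _ in x:
--             c = next(it, None)
--             if c is None:
--                 break
--             buf.append(c)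
--         out.append("".join(buf))
--     return out
-- ===== Notes on version B (the rewrite author's own statement) =====
-- stated objective: alternative
-- what changed: B never slices and keeps no index: it consumes an iterator over token one character at a time (one next() per character of each piece, stopping when the iterator is exhausted) and joins each buffer, instead of A's running-offset slicing of token.
import Mathlib
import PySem

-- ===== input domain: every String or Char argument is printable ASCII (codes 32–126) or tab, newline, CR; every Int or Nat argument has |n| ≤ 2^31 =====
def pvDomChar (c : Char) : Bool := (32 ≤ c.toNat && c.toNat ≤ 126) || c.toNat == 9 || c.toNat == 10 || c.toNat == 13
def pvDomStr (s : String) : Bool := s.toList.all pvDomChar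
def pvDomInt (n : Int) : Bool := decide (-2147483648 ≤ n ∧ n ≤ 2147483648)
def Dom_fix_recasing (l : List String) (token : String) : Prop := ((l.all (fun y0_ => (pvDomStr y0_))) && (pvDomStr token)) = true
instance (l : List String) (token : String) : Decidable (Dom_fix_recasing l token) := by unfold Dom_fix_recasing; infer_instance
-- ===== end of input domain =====

-- B replaces A's index-slicing loop by a char-by-char consumption of an iterator over token (no indices, no slices); same cost, alternative algorithm.

-- ===== PORT A =====
-- threads (output list, running index) through one loop over l, slicing token at absolute indices
def fix_recasing (l : List String) (token : String) : List String :=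
  let tokenl := PySem.Str.lower token
  if tokenl ≠ token then
    (l.foldl (fun (acc : List String × Int) x =>
        let xlen : Int := PySem.Str.len x
        (acc.1 ++ [PySem.Str.slice token (some acc.2) (some (acc.2 + xlen))], acc.2 + xlen))
      ([], 0)).1
  else l

-- ===== PORT B =====
-- inner loop 'for _ in x: c = next(it, None); if c is None: break; buf.append(c)':
-- consumes one char of the iterator's remainder per char of x; returns (buf, remainder)
def pvConsume (xcs : List Char) (rest : List Char) : List Char × List Char :=
  match xcs, rest with
  | [], rest => ([], rest)
  | _ :: _, [] => ([], [])
  | _ :: xs, c :: rest =>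
      let p := pvConsume xs rest
      (c :: p.1, p.2)

-- outer loop over l, carrying the iterator's remaining characters
def pvPieces (l : List String) (rest : List Char) : List String :=
  match l with
  | [] => []
  | x :: xs =>
      let p := pvConsume x.toList rest
      String.ofList p.1 :: pvPieces xs p.2

def fix_recasing_alt (l : List String) (token : String) : List String :=
  if PySem.Str.lower token = token then l
  else pvPieces l token.toList

-- ===== PRECONDITION & SPEC =====
def Spec_fix_recasing (l : List String) (token : String) (out : List String) : Prop := out = fix_recasing_alt l token
instance (l : List String) (token : String) (out : List String) : Decidable (Spec_fix_recasing l token out) := by unfold Spec_fix_recasing; infer_instance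

-- ===== CLAIM (what is proved, stated in full; the proofs are below) =====
def Claim_equal_fix_recasing : Prop := ∀ (l : List String) (token : String), Dom_fix_recasing l token → Spec_fix_recasing l token (fix_recasing l token)

-- ===== LEMMAS AND PROOFS =====

-- consuming |xcs| characters is take/drop of the remainder
lemma pvConsume_eq (xcs : List Char) : ∀ (rest : List Char),
    pvConsume xcs rest = (rest.take xcs.length, rest.drop xcs.length) := by
  induction xcs with
  | nil => intro rest; simp [pvConsume]
  | cons x xs ih =>
      intro rest
      cases rest with
      | nil => simp [pvConsume]
      | cons c cs => simp [pvConsume, ih]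

-- A's fold from (o, j) produces o ++ the pieces cut from the suffix token.toList.drop j
lemma fold_a (token : String) (l : List String) :
    ∀ (o : List String) (j : Nat),
      (l.foldl (fun (acc : List String × Int) x =>
          (acc.1 ++ [PySem.Str.slice token (some acc.2) (some (acc.2 + PySem.Str.len x))],
            acc.2 + PySem.Str.len x)) (o, (j : Int))).1
        = o ++ pvPieces l (token.toList.drop j) := by
  induction l with
  | nil => intro o j; simp [pvPieces]
  | cons x xs ih =>
      intro o j
      simp only [List.foldl_cons, pvPieces, pvConsume_eq]
      have hlen : PySem.Str.len x = ((x.toList.length : Nat) : Int) := PySem.Str.len_eq x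
      have hj : (j : Int) + PySem.Str.len x = ((j + x.toList.length : Nat) : Int) := by
        rw [hlen]; push_cast; ring
      rw [hj, ih]
      have hslice : PySem.Str.slice token (some (j : Int)) (some ((j + x.toList.length : Nat) : Int))
          = String.ofList ((token.toList.drop j).take x.toList.length) := by
        have : ((j + x.toList.length : Nat) : Int) = ((j : Nat) : Int) + ((x.toList.length : Nat) : Int) := by
          push_cast; ring
        rw [this]
        simp [PySem.Str.slice, PySem.List.slice_natCast_add]
      rw [hslice]
      simp [List.drop_drop]

-- ===== VERDICT (by name: the statement is the Claim_ definition above) =====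
theorem fix_recasing_spec : Claim_equal_fix_recasing := by
  intro l token _
  unfold Spec_fix_recasing fix_recasing fix_recasing_alt
  by_cases h : PySem.Str.lower token = token
  · simp [h]
  · simp only [h, ne_eq, not_false_eq_true, if_true, if_neg]
    have := fold_a token l [] 0
    simpa using this
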